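-- pv_equiv track=rewrite | github.com/softlab-unimore/crew | pyccalg/__init__.py | _check_clustering
-- ===== SOURCE A (Python) =====
-- def _check_clustering(clustering, num_vertices):
--     vertex2cluster = {}
--     cid = 0
--     for cluster in clustering:
--         for u in cluster:
--             if u not in vertex2cluster:
--                 vertex2cluster[u] = set()
--             vertex2cluster[u].add(cid)
--         cid += 1
--
--     for u in range(num_vertices):
--         if u not in vertex2cluster or len(vertex2cluster[u]) != 1:
--             return False
--
--     return True
-- ===== SOURCE B (Python) =====
-- def _check_clustering(clustering, num_vertices):
--     # First-owner map + verification pass: a vertex is valid iff it has an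
--     # owner cluster and no in-range member of any cluster lies in a cluster
--     # other than its owner.  No per-vertex collection of cluster ids is kept.
--     owner = {}
--     for cid, cluster in enumerate(clustering):
--         for u in cluster:
--             if u not in owner:
--                 owner[u] = cid
--     for u in range(num_vertices):
--         if u not in owner:
--             return False
--     for cid, cluster in enumerate(clustering):
--         for u in cluster:
--             if 0 <= u < num_vertices and owner[u] != cid:
--                 return False
--     return True
-- ===== Notes on version B (the rewrite author's own statement) =====
-- stated objective: alternative
-- what changed: Instead of collecting a set of cluster ids per vertex and testing its size, B records only each vertex's first owning cluster id, then makes a second verification pass over the clusters rejecting any in-range member whose owner differs from the current cluster, plus a coverage check over range(n).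
import Mathlib
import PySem

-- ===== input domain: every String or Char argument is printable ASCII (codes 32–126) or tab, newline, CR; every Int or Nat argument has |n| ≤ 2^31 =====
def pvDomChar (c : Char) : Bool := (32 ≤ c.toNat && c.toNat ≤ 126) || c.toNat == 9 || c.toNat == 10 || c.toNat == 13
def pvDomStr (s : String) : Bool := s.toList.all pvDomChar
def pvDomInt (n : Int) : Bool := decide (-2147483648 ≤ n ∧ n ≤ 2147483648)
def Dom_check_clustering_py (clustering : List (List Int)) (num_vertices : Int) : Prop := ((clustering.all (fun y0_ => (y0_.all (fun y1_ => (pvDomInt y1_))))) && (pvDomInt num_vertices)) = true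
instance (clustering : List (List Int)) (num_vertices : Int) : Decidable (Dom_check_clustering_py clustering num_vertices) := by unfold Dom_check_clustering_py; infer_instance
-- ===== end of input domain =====

-- B replaces A's per-vertex set of cluster ids by a first-owner map plus a second
-- verification pass over the clusters (no per-vertex collection of ids); objective:
-- alternative algorithm, same asymptotic cost.

-- ===== PORT A =====
-- 'for u in range(a, n): if not f(u): return False' / 'return True' — Python's range is
-- lazy with early exit, so the loop is ported as this early-exit recursion (exact)
def pvLoop (f : Int → Bool) (u n : Int) : Bool :=
  if h : u < n then (f u && pvLoop f (u + 1) n) else true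
termination_by (n - u).toNat
decreasing_by omega

-- inner loop body of A: 'if u not in d: d[u] = set()' then 'd[u].add(cid)'
def pvStepA (cid : Int) (d : PySem.Dict Int (PySem.Set Int)) (u : Int) : PySem.Dict Int (PySem.Set Int) :=
  let d1 := if d.contains u then d else d.insert u PySem.Set.empty
  d1.insert u (PySem.Set.add (d1.getD u PySem.Set.empty) cid)

def check_clustering_py (clustering : List (List Int)) (num_vertices : Int) : Bool :=
  let st := clustering.foldl
    (fun (st : PySem.Dict Int (PySem.Set Int) × Int) cluster =>
      (cluster.foldl (pvStepA st.2) st.1, st.2 + 1))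
    (PySem.Dict.empty, 0)
  -- 'for u in range(num_vertices): if u not in d or len(d[u]) != 1: return False' / 'return True'
  pvLoop (fun u => st.1.contains u && (PySem.Set.len (st.1.getD u PySem.Set.empty) == 1))
    0 num_vertices

-- ===== PORT B =====
def check_clustering_py_alt (clustering : List (List Int)) (num_vertices : Int) : Bool :=
  -- pass 1: owner[u] = id of the first cluster containing u
  let owner : PySem.Dict Int Int := (clustering.foldl
    (fun (st : PySem.Dict Int Int × Int) cluster =>
      (cluster.foldl (fun o u => if o.contains u then o else o.insert u st.2) st.1, st.2 + 1))
    (PySem.Dict.empty, 0)).1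
  -- pass 2: 'for u in range(n): if u not in owner: return False'
  (pvLoop (fun u => owner.contains u) 0 num_vertices) &&
  -- pass 3: 'for cid, cluster in enumerate(...): for u in cluster: if 0<=u<n and owner[u]!=cid: return False'
  -- (owner[u] cannot raise: every member of a cluster was inserted in pass 1; getD's default is never used)
  ((clustering.foldl
      (fun (st : Bool × Int) cluster =>
        (st.1 && cluster.all (fun u =>
          !(decide (0 ≤ u) && decide (u < num_vertices)) || (owner.getD u 0 == st.2)), st.2 + 1))
      (true, 0)).1)

-- ===== PRECONDITION & SPEC =====
def Spec_check_clustering_py (clustering : List (List Int)) (num_vertices : Int) (out : Bool) : Prop := out = check_clustering_py_alt clustering num_vertices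
instance (clustering : List (List Int)) (num_vertices : Int) (out : Bool) : Decidable (Spec_check_clustering_py clustering num_vertices out) := by unfold Spec_check_clustering_py; infer_instance

-- ===== CLAIM (what is proved, stated in full; the proofs are below) =====
def Claim_equal_check_clustering_py : Prop := ∀ (clustering : List (List Int)) (num_vertices : Int), Dom_check_clustering_py clustering num_vertices → Spec_check_clustering_py clustering num_vertices (check_clustering_py clustering num_vertices)

-- ===== LEMMAS AND PROOFS =====

theorem pvLoop_eq (f : Int → Bool) (u n : Int) :
    pvLoop f u n = (PySem.List.pyRange u n 1).all f := by
  rw [pvLoop]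
  by_cases h : u < n
  · rw [dif_pos h, PySem.List.pyRange_one_cons h, List.all_cons, pvLoop_eq f (u + 1) n]
  · rw [dif_neg h, PySem.List.pyRange_one_eq_nil (by omega), List.all_nil]
termination_by (n - u).toNat
decreasing_by omega

-- the list of ids (offset by k) of the clusters containing u, in order
def pvCids (k : Int) (clustering : List (List Int)) (u : Int) : List Int :=
  match clustering with
  | [] => []
  | cl :: rest => (if u ∈ cl then [k] else []) ++ pvCids (k + 1) rest u

theorem pvCids_lb (clustering : List (List Int)) (k u c : Int) (h : c ∈ pvCids k clustering u) : k ≤ c := by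
  induction clustering generalizing k with
  | nil => simp [pvCids] at h
  | cons cl rest ih =>
    simp only [pvCids, List.mem_append] at h
    rcases h with h | h
    · split at h <;> simp at h; omega
    · have := ih (k + 1) h; omega

theorem pvCids_pairwise (clustering : List (List Int)) (k u : Int) :
    (pvCids k clustering u).Pairwise (· < ·) := by
  induction clustering generalizing k with
  | nil => simp [pvCids]
  | cons cl rest ih =>
    simp only [pvCids]
    rw [List.pairwise_append]
    refine ⟨?_, ih (k + 1), ?_⟩
    · split <;> simp
    · intro a ha b hb
      have hb' := pvCids_lb rest (k + 1) u b hb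
      split at ha <;> simp at ha; omega

-- ---- characterization of A's dict ----
theorem pvStepA_get? (cid : Int) (l : List Int) (d : PySem.Dict Int (PySem.Set Int)) (u : Int) :
    (l.foldl (pvStepA cid) d).get? u =
      if u ∈ l then some (PySem.Set.add (d.getD u PySem.Set.empty) cid) else d.get? u := by
  induction l generalizing d with
  | nil => simp
  | cons x xs ih =>
    have hx : (pvStepA cid d x).get? u =
        if u = x then some (PySem.Set.add (d.getD x PySem.Set.empty) cid) else d.get? u := by
      unfold pvStepA
      by_cases hcx : d.contains x
      · simp only [hcx, if_true, PySem.Dict.get?_insert]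

      · have hdx : d.getD x PySem.Set.empty = PySem.Set.empty :=
          PySem.Dict.getD_of_not_contains d _ (by simp [hcx])
        simp only [hcx, Bool.false_eq_true, if_false, PySem.Dict.get?_insert,
          PySem.Dict.getD_insert, hdx]
        by_cases hux : u = x <;> simp [hux]
    have hgd : (pvStepA cid d x).getD u PySem.Set.empty =
        if u = x then PySem.Set.add (d.getD x PySem.Set.empty) cid
        else d.getD u PySem.Set.empty := by
      rw [PySem.Dict.getD_eq_get?_getD, hx]
      by_cases hux : u = x <;> simp [hux, PySem.Dict.getD_eq_get?_getD]
    simp only [List.foldl_cons, ih]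
    by_cases hux : u = x
    · subst hux
      by_cases hmem : u ∈ xs
      · simp only [List.mem_cons, hmem, or_true, if_true, hgd]
        have hid : PySem.Set.add (PySem.Set.add (d.getD u PySem.Set.empty) cid) cid =
            PySem.Set.add (d.getD u PySem.Set.empty) cid := by
          by_cases h : cid ∈ d.getD u ([] : PySem.Set Int) <;> simp [h]
        rw [hid]
      · simp [hmem, hx]
    · by_cases hmem : u ∈ xs
      · have hgd' := hgd
        rw [if_neg hux] at hgd'
        have hgd'' : (pvStepA cid d x).getD u [] = d.getD u [] := hgd'
        simp [hmem, hux, hgd'']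
      · simp [hmem, hux, hx]

theorem pvA_char (clustering : List (List Int)) (d : PySem.Dict Int (PySem.Set Int)) (cid : Int)
    (hInv : ∀ u s, d.get? u = some s → s ≠ [] ∧ ∀ x ∈ s, x < cid) (u : Int) :
    ((clustering.foldl
        (fun (st : PySem.Dict Int (PySem.Set Int) × Int) cluster =>
          (cluster.foldl (pvStepA st.2) st.1, st.2 + 1)) (d, cid)).1.get? u) =
      match d.get? u with
      | none => if pvCids cid clustering u = [] then none else some (pvCids cid clustering u)
      | some s => some (s ++ pvCids cid clustering u) := by
  induction clustering generalizing d cid with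
  | nil =>
    simp only [List.foldl_nil, pvCids]
    cases hg : d.get? u <;> simp
  | cons cl rest ih =>
    simp only [List.foldl_cons]
    have hd' : (cl.foldl (pvStepA cid) d).get? u =
        if u ∈ cl then some ((d.getD u PySem.Set.empty) ++ [cid]) else d.get? u := by
      rw [pvStepA_get?]
      by_cases hm : u ∈ cl
      · have hnot : cid ∉ d.getD u ([] : PySem.Set Int) := by
          cases hg : d.get? u with
          | none => simp [PySem.Dict.getD_eq_get?_getD, hg]
          | some s =>
            have := (hInv u s hg).2
            rw [PySem.Dict.getD_eq_get?_getD, hg]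
            intro hc
            exact absurd (this cid hc) (lt_irrefl cid)
        simp [hm, PySem.Set.add_of_not_mem hnot]
      · simp [hm]
    have hInv' : ∀ u' s, (cl.foldl (pvStepA cid) d).get? u' = some s →
        s ≠ [] ∧ ∀ x ∈ s, x < cid + 1 := by
      intro u' s hs
      have hd'' : (cl.foldl (pvStepA cid) d).get? u' =
          if u' ∈ cl then some ((d.getD u' PySem.Set.empty) ++ [cid]) else d.get? u' := by
        rw [pvStepA_get?]
        by_cases hm : u' ∈ cl
        · have hnot : cid ∉ d.getD u' ([] : PySem.Set Int) := by
            cases hg : d.get? u' with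
            | none => simp [PySem.Dict.getD_eq_get?_getD, hg]
            | some t =>
              have := (hInv u' t hg).2
              rw [PySem.Dict.getD_eq_get?_getD, hg]
              intro hc
              exact absurd (this cid hc) (lt_irrefl cid)
          simp [hm, PySem.Set.add_of_not_mem hnot]
        · simp [hm]
      rw [hd''] at hs
      by_cases hm : u' ∈ cl
      · rw [if_pos hm] at hs
        injection hs with hs
        subst hs
        refine ⟨by simp, ?_⟩
        intro x hx
        rcases List.mem_append.1 hx with hx | hx
        · cases hg : d.get? u' with
          | none =>
            rw [PySem.Dict.getD_eq_get?_getD, hg] at hx; simp at hx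
          | some t =>
            rw [PySem.Dict.getD_eq_get?_getD, hg] at hx
            have := (hInv u' t hg).2 x hx; omega
        · simp at hx; omega
      · rw [if_neg hm] at hs
        have := hInv u' s hs
        exact ⟨this.1, fun x hx => by have := this.2 x hx; omega⟩
    rw [ih _ _ hInv']
    simp only [pvCids]
    by_cases hm : u ∈ cl
    · rw [hd']
      simp only [hm, if_true]
      cases hg : d.get? u with
      | none =>
        rw [PySem.Dict.getD_eq_get?_getD, hg]
        simp
      | some s =>
        rw [PySem.Dict.getD_eq_get?_getD, hg]
        simp
    · rw [hd']
      simp only [hm, if_false]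
      cases hg : d.get? u <;> simp

-- ---- characterization of B's owner dict ----
theorem pvB1_inner (cl : List Int) (o : PySem.Dict Int Int) (cid u : Int) :
    (cl.foldl (fun o u => if o.contains u then o else o.insert u cid) o).get? u =
      match o.get? u with
      | some v => some v
      | none => if u ∈ cl then some cid else none := by
  induction cl generalizing o with
  | nil => cases hg : o.get? u <;> simp [hg]
  | cons x xs ih =>
    simp only [List.foldl_cons]
    by_cases hcx : o.contains x
    · rw [if_pos hcx, ih]
      cases hg : o.get? u with
      | some v => simp
      | none =>
        have hux : u ≠ x := by
          intro h; subst h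
          rw [PySem.Dict.contains_eq_isSome_get?, hg] at hcx; simp at hcx
        simp [hux]
    · rw [if_neg hcx, ih]
      cases hg : o.get? u with
      | some v =>
        have hux : u ≠ x := by
          intro h; subst h
          rw [PySem.Dict.contains_eq_isSome_get?, hg] at hcx; simp at hcx
        simp [PySem.Dict.get?_insert, hux, hg]
      | none =>
        by_cases hux : u = x
        · subst hux; simp
        · simp [PySem.Dict.get?_insert, hux, hg]

theorem pvB1_char (clustering : List (List Int)) (o : PySem.Dict Int Int) (cid u : Int) :
    ((clustering.foldl
        (fun (st : PySem.Dict Int Int × Int) cluster =>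
          (cluster.foldl (fun o u => if o.contains u then o else o.insert u st.2) st.1, st.2 + 1))
        (o, cid)).1.get? u) =
      match o.get? u with
      | some v => some v
      | none => (pvCids cid clustering u).head? := by
  induction clustering generalizing o cid with
  | nil => simp only [List.foldl_nil, pvCids]; cases hg : o.get? u <;> simp
  | cons cl rest ih =>
    simp only [List.foldl_cons]
    rw [ih, pvB1_inner]
    cases hg : o.get? u with
    | some v => simp
    | none =>
      simp only [pvCids]
      by_cases hm : u ∈ cl <;> simp [hm]

-- ---- characterization of B's verification pass ----
def pvChk (owner : PySem.Dict Int Int) (n cid : Int) (clustering : List (List Int)) : Bool :=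
  match clustering with
  | [] => true
  | cl :: rest =>
    cl.all (fun u => !(decide (0 ≤ u) && decide (u < n)) || (owner.getD u 0 == cid)) &&
    pvChk owner n (cid + 1) rest

theorem pvB2_char (clustering : List (List Int)) (owner : PySem.Dict Int Int) (n : Int)
    (b : Bool) (cid : Int) :
    (clustering.foldl
      (fun (st : Bool × Int) cluster =>
        (st.1 && cluster.all (fun u =>
          !(decide (0 ≤ u) && decide (u < n)) || (owner.getD u 0 == st.2)), st.2 + 1))
      (b, cid)).1 = (b && pvChk owner n cid clustering) := by
  induction clustering generalizing b cid with
  | nil => simp [pvChk]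
  | cons cl rest ih =>
    simp only [List.foldl_cons, pvChk]
    rw [ih, Bool.and_assoc]

theorem pvChk_iff (clustering : List (List Int)) (owner : PySem.Dict Int Int) (n cid : Int) :
    pvChk owner n cid clustering = true ↔
      ∀ u c, 0 ≤ u → u < n → c ∈ pvCids cid clustering u → owner.getD u 0 = c := by
  induction clustering generalizing cid with
  | nil => simp [pvChk, pvCids]
  | cons cl rest ih =>
    simp only [pvChk, Bool.and_eq_true, List.all_eq_true, ih]
    constructor
    · rintro ⟨h1, h2⟩ u c hu0 hun hc
      simp only [pvCids, List.mem_append] at hc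
      rcases hc with hc | hc
      · split at hc <;> simp at hc
        subst hc
        have := h1 u (by assumption)
        simp [hu0, hun] at this
        exact this
      · exact h2 u c hu0 hun hc
    · intro h
      refine ⟨?_, ?_⟩
      · intro u hu
        by_cases hu0 : 0 ≤ u
        · by_cases hun : u < n
          · have := h u cid hu0 hun (by simp [pvCids, hu])
            simp [hu0, hun, this]
          · simp [hun]
        · simp [hu0]
      · intro u c hu0 hun hc
        exact h u c hu0 hun (by simp [pvCids, List.mem_append]; right; exact hc)

-- the per-vertex condition both sides reduce to
theorem pvKey (C : List (List Int)) (n : Int) :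
    (∀ u, 0 ≤ u → u < n → (pvCids 0 C u).length = 1) ↔
      ((∀ u, 0 ≤ u → u < n → pvCids 0 C u ≠ []) ∧
       (∀ u c, 0 ≤ u → u < n → c ∈ pvCids 0 C u → (pvCids 0 C u).head?.getD 0 = c)) := by
  constructor
  · intro h
    refine ⟨fun u h0 hn => by have := h u h0 hn; intro he; rw [he] at this; simp at this, ?_⟩
    intro u c h0 hn hc
    have hl := h u h0 hn
    match hx : pvCids 0 C u with
    | [] => rw [hx] at hl; simp at hl
    | x :: t =>
      rw [hx] at hl hc
      simp at hl
      subst hl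
      simp at hc
      simp [hc]
  · rintro ⟨h1, h2⟩ u h0 hn
    have hne := h1 u h0 hn
    match hx : pvCids 0 C u with
    | [] => exact absurd hx hne
    | x :: t =>
      have hpw := pvCids_pairwise C 0 u
      rw [hx] at hpw
      have hth : ∀ c ∈ t, x < c := (List.pairwise_cons.1 hpw).1
      match t with
      | [] => simp
      | y :: t' =>
        have hy : (pvCids 0 C u).head?.getD 0 = y :=
          h2 u y h0 hn (by rw [hx]; simp)
        rw [hx] at hy
        simp at hy
        have := hth y (by simp)
        omega

-- ===== VERDICT (by name: the statement is the Claim_ definition above) =====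
theorem check_clustering_py_spec : Claim_equal_check_clustering_py := by
  intro C n _
  unfold Spec_check_clustering_py check_clustering_py check_clustering_py_alt
  simp only []
  have hA := pvA_char C PySem.Dict.empty 0 (fun u s hs => by simp at hs) 
  simp only [PySem.Dict.get?_empty] at hA
  have hB := pvB1_char C PySem.Dict.empty 0
  simp only [PySem.Dict.get?_empty] at hB
  rw [pvB2_char, pvLoop_eq, pvLoop_eq]
  rw [Bool.eq_iff_iff]
  simp only [Bool.and_eq_true, List.all_eq_true, PySem.List.mem_pyRange_one, true_and]
  -- rewrite A's per-vertex test
  have hAu : ∀ u, ((C.foldl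
        (fun (st : PySem.Dict Int (PySem.Set Int) × Int) cluster =>
          (cluster.foldl (pvStepA st.2) st.1, st.2 + 1)) (PySem.Dict.empty, 0)).1.contains u = true ∧
        (PySem.Set.len ((C.foldl
        (fun (st : PySem.Dict Int (PySem.Set Int) × Int) cluster =>
          (cluster.foldl (pvStepA st.2) st.1, st.2 + 1)) (PySem.Dict.empty, 0)).1.getD u PySem.Set.empty) == 1) = true) ↔
      (pvCids 0 C u).length = 1 := by
    intro u
    rw [PySem.Dict.contains_eq_isSome_get?, PySem.Dict.getD_eq_get?_getD, hA u]
    by_cases he : pvCids 0 C u = []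
    · simp [he]
    · simp only [he, if_false, Option.isSome_some, Option.getD_some,
        PySem.Set.len, beq_iff_eq]
      constructor
      · rintro ⟨-, h2⟩; omega
      · intro h2; exact ⟨trivial, by omega⟩
  -- rewrite B's owner lookups
  have hBc : ∀ u, ((C.foldl
        (fun (st : PySem.Dict Int Int × Int) cluster =>
          (cluster.foldl (fun o u => if o.contains u then o else o.insert u st.2) st.1, st.2 + 1))
        (PySem.Dict.empty, 0)).1.contains u) = true ↔ pvCids 0 C u ≠ [] := by
    intro u
    rw [PySem.Dict.contains_eq_isSome_get?, hB u]
    cases hx : pvCids 0 C u <;> simp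
  have hBg : ∀ u, ((C.foldl
        (fun (st : PySem.Dict Int Int × Int) cluster =>
          (cluster.foldl (fun o u => if o.contains u then o else o.insert u st.2) st.1, st.2 + 1))
        (PySem.Dict.empty, 0)).1.getD u 0) = (pvCids 0 C u).head?.getD 0 := by
    intro u
    rw [PySem.Dict.getD_eq_get?_getD, hB u]
  constructor
  · intro h
    have hk := (pvKey C n).1 (fun u h0 hn => (hAu u).1 (h u ⟨h0, hn⟩))
    refine ⟨fun u hu => (hBc u).2 (hk.1 u hu.1 hu.2), ?_⟩
    rw [pvChk_iff]
    intro u c h0 hn hc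
    rw [hBg u]
    exact hk.2 u c h0 hn hc
  · rintro ⟨h1, h2⟩
    rw [pvChk_iff] at h2
    intro u hu
    refine (hAu u).2 ?_
    refine (pvKey C n).2 ⟨fun v v0 vn => (hBc v).1 (h1 v ⟨v0, vn⟩), ?_⟩ u hu.1 hu.2
    intro v c v0 vn hc
    rw [← hBg v]
    exact h2 v c v0 vn hc
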